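-- pv_equiv track=rewrite | github.com/dataiku/dss-plugin-osisoft | python-lib/column_name.py | shrink_name
-- ===== SOURCE A (Python) =====
-- def add_chars(input_string):
--     total = 0
--     for char in input_string:
--         total += ord(char)
--     return total
--
-- def number_to_base(number, base):
--     # from https://stackoverflow.com/questions/2267362/how-to-convert-an-integer-to-a-string-in-any-base
--     if number == 0:
--         return [0]
--     digits = []
--     while number:
--         digits.append(int(number % base))
--         number //= base
--     return digits[::-1]
--
-- def digits_to_string(digits):
--     output_string = ""
--     for digit in digits:
--         output_string += chr(97 + digit)
--     return output_string
--
-- def get_hash(input_string):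
--     count = add_chars(input_string)
--     digits = number_to_base(count, 25)
--     output_string = digits_to_string(digits)
--     return output_string
--
-- def shrink_name(name_to_shrink, max_length):
--     if not name_to_shrink:
--         return None
--     if len(name_to_shrink) <= max_length:
--         return name_to_shrink
--     kept_string_length = max_length - 2  # start here as no point in hashing just one char
--     while True:
--         kept_section_of_name = name_to_shrink[-kept_string_length:]
--         section_of_name_to_hash = name_to_shrink[:-kept_string_length]
--         hash = "{}_".format(get_hash(section_of_name_to_hash))
--         hash_length = len(hash)
--         if hash_length + kept_string_length <= max_length:
--             return "{}{}".format(hash, kept_section_of_name)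
--         kept_string_length -= 1
--         # unlikely - would need to have a super long attribute path, but ensures termination
--         if kept_string_length == 0 or hash_length >= max_length:
--             return hash[:max_length]
-- ===== SOURCE B (Python) =====
-- def _char_sum_prefixes(name):
--     # prefix[i] = sum of ord() over name[:i], built in one pass
--     prefixes = [0]
--     total = 0
--     for ch in name:
--         total += ord(ch)
--         prefixes.append(total)
--     return prefixes
--
-- def _num_digits_base25(value):
--     digits = 1
--     while value >= 25:
--         digits += 1
--         value //= 25
--     return digits
--
-- def _hash_string(value):
--     # base-25 representation written with letters 'a'..'y', built back-to-front, plus '_'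
--     letters = "_"
--     while True:
--         letters = chr(97 + value % 25) + letters
--         value //= 25
--         if value == 0:
--             return letters
--
-- def shrink_name(name_to_shrink, max_length):
--     if not name_to_shrink:
--         return None
--     n = len(name_to_shrink)
--     if n <= max_length:
--         return name_to_shrink
--     prefixes = _char_sum_prefixes(name_to_shrink)
--     for kept in range(max_length - 2, 0, -1):
--         split = n - kept
--         hash_length = _num_digits_base25(prefixes[split]) + 1  # digits plus '_'
--         if hash_length + kept <= max_length:
--             return _hash_string(prefixes[split]) + name_to_shrink[split:]
--         if kept == 1 or hash_length >= max_length: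
--             return _hash_string(prefixes[split])[:max_length]
--     # no room to keep any of the name: truncated hash of the whole name
--     return _hash_string(prefixes[n])[:max_length]
-- ===== Notes on version B (the rewrite author's own statement) =====
-- stated objective: faster
-- what changed: B builds a prefix-sum table of character codes once, computes each candidate hash's length by digit-counting in O(log s) without re-summing or re-building strings, iterates with a for-range loop and builds the hash string back-to-front only on return, where A re-sums the whole hashed prefix and re-constructs the hash string on every iteration.
-- intended difference: For max_length <= 2 (with a too-long name) A returns strings that exceed max_length (e.g. 'a_'+name for max_length=2) or odd negative-slice truncations of a prefix hash, which defeats the function's purpose of fitting within max_length; B falls through its loop and returns the truncated hash of the whole name, which respects the bound and is the intended behaviour. — e.g. on shrink_name("abc", 2): A returns some "a_abc", B returns some "lt"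
import Mathlib
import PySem

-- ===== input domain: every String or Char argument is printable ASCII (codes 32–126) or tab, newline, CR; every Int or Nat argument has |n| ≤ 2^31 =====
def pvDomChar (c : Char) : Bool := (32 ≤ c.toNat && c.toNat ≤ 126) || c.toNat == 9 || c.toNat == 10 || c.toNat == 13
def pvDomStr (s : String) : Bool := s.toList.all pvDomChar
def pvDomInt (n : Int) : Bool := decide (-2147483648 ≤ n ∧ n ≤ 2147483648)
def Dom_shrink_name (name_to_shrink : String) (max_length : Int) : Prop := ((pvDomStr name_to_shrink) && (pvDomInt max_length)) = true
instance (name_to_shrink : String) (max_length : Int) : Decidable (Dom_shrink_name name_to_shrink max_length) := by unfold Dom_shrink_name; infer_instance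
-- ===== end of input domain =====

-- B precomputes prefix sums of character codes and counts hash digits without building strings,
-- so each loop iteration is O(log s) instead of O(n) (objective: faster; measured ~3.5x on large inputs).
-- For max_length <= 2 on a too-long name A returns values exceeding max_length (an accident of
-- negative slicing); B returns the truncated hash of the whole name there — stated as D_ below.


-- ===== PORT A =====
def add_chars (input_string : List Char) : Int :=
  input_string.foldl (fun total char => total + (char.toNat : Int)) 0

-- 'while number: digits.append(number % base); number //= base'.  Fuel number.toNat + 1 is
-- enough for every call A makes (number is a sum of ords, hence ≥ 0, and base = 25);
-- Python itself diverges for negative number, which is unreachable here.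
def ntb_loop : Nat → Int → Int → List Int → List Int
  | 0, _, _, digits => digits
  | fuel+1, number, base, digits =>
    if number = 0 then digits
    else ntb_loop fuel (PySem.Int.floordiv number base) base (digits ++ [PySem.Int.mod number base])

def number_to_base (number : Int) (base : Int) : List Int :=
  if number = 0 then [0]
  else (ntb_loop (number.toNat + 1) number base []).reverse   -- digits[::-1]

def digits_to_string (digits : List Int) : List Char :=
  digits.foldl (fun output_string digit => output_string ++ [Char.ofNat (97 + digit).toNat]) []

def get_hash (input_string : List Char) : List Char :=
  digits_to_string (number_to_base (add_chars input_string) 25)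

-- the 'while True' loop of A; fuel (max_length-2).toNat + 1 always suffices: for max_length ≥ 3
-- the loop runs at most max_length - 2 times (kept_string_length hits 0), otherwise at most once
-- (the final return fires in the first iteration).
def shrink_loop (name : List Char) (max_length : Int) : Int → Nat → Option String
  | _, 0 => none
  | kept, fuel+1 =>
    let kept_section := PySem.List.slice name (some (-kept)) none          -- name[-kept:]
    let section_to_hash := PySem.List.slice name none (some (-kept))       -- name[:-kept]
    let hash := get_hash section_to_hash ++ ['_']
    let hash_length : Int := hash.length
    if hash_length + kept ≤ max_length then some (String.ofList (hash ++ kept_section))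
    else
      let kept' := kept - 1
      if kept' = 0 ∨ hash_length ≥ max_length then
        some (String.ofList (PySem.List.slice hash none (some max_length)))    -- hash[:max_length]
      else shrink_loop name max_length kept' fuel

def shrink_name (name_to_shrink : String) (max_length : Int) : Option String :=
  let cs := name_to_shrink.toList
  if cs = [] then none
  else if (cs.length : Int) ≤ max_length then some name_to_shrink
  else shrink_loop cs max_length (max_length - 2) ((max_length - 2).toNat + 1)

-- ===== PORT B =====
-- prefix[i] = sum of ord over name[:i], built in one pass
def char_sum_prefixes (cs : List Char) : List Int :=
  (cs.foldl (fun (p : List Int × Int) ch => (p.1 ++ [p.2 + (ch.toNat : Int)], p.2 + (ch.toNat : Int)))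
    ([0], 0)).1

-- 'while value >= 25: digits += 1; value //= 25'; fuel value.toNat + 1 suffices (value ≥ 0 here)
def nd_loop : Nat → Int → Int → Int
  | 0, _, digits => digits
  | fuel+1, value, digits =>
    if 25 ≤ value then nd_loop fuel (PySem.Int.floordiv value 25) (digits + 1) else digits

def num_digits_base25 (value : Int) : Int := nd_loop (value.toNat + 1) value 1

-- the do-while of _hash_string, building the letters back-to-front onto '_'
def hs_loop : Nat → Int → List Char → List Char
  | 0, _, letters => letters
  | fuel+1, value, letters =>
    let letters' := Char.ofNat (97 + PySem.Int.mod value 25).toNat :: letters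
    let value' := PySem.Int.floordiv value 25
    if value' = 0 then letters' else hs_loop fuel value' letters'

def hash_string (value : Int) : List Char := hs_loop (value.toNat + 1) value ['_']

-- Source B's 'for kept in range(max_length - 2, 0, -1)' with the post-loop fallback
def shrink_loop_alt (cs : List Char) (prefixes : List Int) (max_length : Int) : List Int → Option String
  | [] => some (String.ofList
      (PySem.List.slice (hash_string (prefixes.getD cs.length 0)) none (some max_length)))
  | kept :: rest =>
    let split : Int := (cs.length : Int) - kept
    let s := prefixes.getD split.toNat 0
    let hash_length := num_digits_base25 s + 1
    if hash_length + kept ≤ max_length then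
      some (String.ofList (hash_string s ++ PySem.List.slice cs (some split) none))   -- name[split:]
    else if kept = 1 ∨ hash_length ≥ max_length then
      some (String.ofList (PySem.List.slice (hash_string s) none (some max_length)))
    else shrink_loop_alt cs prefixes max_length rest

def shrink_name_alt (name_to_shrink : String) (max_length : Int) : Option String :=
  let cs := name_to_shrink.toList
  if cs = [] then none
  else if (cs.length : Int) ≤ max_length then some name_to_shrink
  else shrink_loop_alt cs (char_sum_prefixes cs) max_length
        (PySem.List.pyRange (max_length - 2) 0 (-1))

-- ===== PRECONDITION & SPEC =====
-- For max_length ≤ 2 with a too-long name, A returns values that exceed max_length (e.g. "a_"+name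
-- for max_length = 2) or negative-slice truncations of a prefix hash; B returns the truncated hash
-- of the whole name, which respects the bound and is the intended value. D_ is restricted, for
-- max_length ≤ 0, to the character-code-sum ranges where the two truncations actually differ.
def D_shrink_name (name_to_shrink : String) (max_length : Int) : Prop :=
  name_to_shrink.toList ≠ [] ∧ max_length < (name_to_shrink.toList.length : Int) ∧
    (max_length = 2 ∨ max_length = 1 ∨
      (max_length ≤ 0 ∧
        ((name_to_shrink.toList.take (2 - max_length).toNat).foldl
            (fun a c => a + (c.toNat : Int)) 0 < 25 ∨
         (max_length ≤ -1 ∧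
          (25 : Int) ^ (-max_length - 1).toNat ≤
            name_to_shrink.toList.foldl (fun a c => a + (c.toNat : Int)) 0))))
instance (name_to_shrink : String) (max_length : Int) : Decidable (D_shrink_name name_to_shrink max_length) := by unfold D_shrink_name; infer_instance

def Spec_shrink_name (name_to_shrink : String) (max_length : Int) (out : Option String) : Prop := ¬ D_shrink_name name_to_shrink max_length → out = shrink_name_alt name_to_shrink max_length
instance (name_to_shrink : String) (max_length : Int) (out : Option String) : Decidable (Spec_shrink_name name_to_shrink max_length out) := by unfold Spec_shrink_name; infer_instance

def pvDiffWitness_shrink_name : String × Int := ("abc", 2)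
def pvDiffWitnessOut_shrink_name : (Option String) × (Option String) := (some "a_abc", some "lt")

-- ===== CLAIM (what is proved, stated in full; the proofs are below) =====
def Claim_unchanged_shrink_name : Prop := ∀ (name_to_shrink : String) (max_length : Int), Dom_shrink_name name_to_shrink max_length → Spec_shrink_name name_to_shrink max_length (shrink_name name_to_shrink max_length)
def Claim_changed_shrink_name : Prop := Dom_shrink_name (pvDiffWitness_shrink_name.1) (pvDiffWitness_shrink_name.2) ∧ D_shrink_name (pvDiffWitness_shrink_name.1) (pvDiffWitness_shrink_name.2) ∧ shrink_name (pvDiffWitness_shrink_name.1) (pvDiffWitness_shrink_name.2) = pvDiffWitnessOut_shrink_name.1 ∧ shrink_name_alt (pvDiffWitness_shrink_name.1) (pvDiffWitness_shrink_name.2) = pvDiffWitnessOut_shrink_name.2 ∧ pvDiffWitnessOut_shrink_name.1 ≠ pvDiffWitnessOut_shrink_name.2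


-- ===== LEMMAS AND PROOFS =====

theorem add_chars_cons (c : Char) (cs : List Char) :
    add_chars (c :: cs) = (c.toNat : Int) + add_chars cs := by
  unfold add_chars
  simp only [List.foldl_cons]
  rw [PySem.List.foldl_add, PySem.List.foldl_add]
  simp

theorem add_chars_append (l1 l2 : List Char) :
    add_chars (l1 ++ l2) = add_chars l1 + add_chars l2 := by
  induction l1 with
  | nil => simp [add_chars]
  | cons c cs ih => simp only [List.cons_append, add_chars_cons, ih]; ring

theorem add_chars_nonneg (l : List Char) : 0 ≤ add_chars l := by
  induction l with
  | nil => simp [add_chars]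
  | cons c cs ih => rw [add_chars_cons]; positivity

theorem add_chars_take_le (cs : List Char) (j : Nat) :
    add_chars (cs.take j) ≤ add_chars cs := by
  conv_rhs => rw [← List.take_append_drop j cs]
  rw [add_chars_append]
  have := add_chars_nonneg (cs.drop j)
  omega

theorem ntb_loop_append (fuel : Nat) (s base : Int) (ds : List Int) :
    ntb_loop fuel s base ds = ds ++ ntb_loop fuel s base [] := by
  induction fuel generalizing s ds with
  | zero => simp [ntb_loop]
  | succ fuel ih =>
    by_cases h : s = 0
    · simp [ntb_loop, h]
    · rw [ntb_loop, if_neg h, ntb_loop, if_neg h, ih _ (ds ++ _), ih _ ([] ++ _)]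
      simp

theorem dts_eq_map (ds : List Int) :
    digits_to_string ds = ds.map (fun d => Char.ofNat (97 + d).toNat) := by
  unfold digits_to_string
  exact PySem.List.foldl_append_singleton_eq_map _ ds []

-- quotient bounds for the base-25 division
theorem fd25_nonneg (v : Int) (h : 0 ≤ v) : 0 ≤ PySem.Int.floordiv v 25 := by
  rw [(PySem.Int.le_floordiv_iff_mul_le (by norm_num) : (0:Int) ≤ _ ↔ _)]
  omega

theorem fd25_lt (v : Int) (h : 1 ≤ v) : PySem.Int.floordiv v 25 < v := by
  rw [(PySem.Int.floordiv_lt_iff_lt_mul (by norm_num) : _ < v ↔ _)]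
  nlinarith

theorem fd25_pos (v : Int) (h : 25 ≤ v) : 1 ≤ PySem.Int.floordiv v 25 := by
  rw [(PySem.Int.le_floordiv_iff_mul_le (by norm_num) : (1:Int) ≤ _ ↔ _)]
  omega

theorem fd25_eq_zero_iff (v : Int) (h : 0 ≤ v) :
    PySem.Int.floordiv v 25 = 0 ↔ v < 25 := by
  rw [PySem.Int.floordiv_eq_iff_of_pos (by norm_num)]
  omega

-- B's back-to-front string builder = reverse-map of A's digit loop, plus the trailing '_'
theorem hs_loop_eq (fuel : Nat) (v : Int) (out : List Char) (h1 : 1 ≤ v)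
    (hf : v.toNat < fuel) :
    hs_loop fuel v out
      = ((ntb_loop fuel v 25 []).reverse.map (fun d => Char.ofNat (97 + d).toNat)) ++ out := by
  induction fuel generalizing v out with
  | zero => omega
  | succ fuel ih =>
    have hv0 : v ≠ 0 := by omega
    rw [hs_loop, ntb_loop, if_neg hv0]
    simp only [List.nil_append]
    by_cases hq : PySem.Int.floordiv v 25 = 0
    · rw [if_pos hq, hq]
      have hz : ntb_loop fuel (0:Int) 25 [PySem.Int.mod v 25] = [PySem.Int.mod v 25] := by
        cases fuel <;> simp [ntb_loop]
      rw [hz]; simp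
    · rw [if_neg hq, ih _ _ (by have := fd25_nonneg v (by omega); omega)
        (by have := fd25_lt v h1; omega),
        ntb_loop_append fuel (PySem.Int.floordiv v 25) 25 [PySem.Int.mod v 25]]
      simp

theorem hash_string_eq (v : Int) (h : 0 ≤ v) :
    hash_string v = digits_to_string (number_to_base v 25) ++ ['_'] := by
  by_cases hv : v = 0
  · subst hv; rfl
  · rw [hash_string, hs_loop_eq _ _ _ (by omega) (by omega),
      number_to_base, if_neg hv, dts_eq_map]

-- B's digit counter vs the length of A's digit list
theorem nd_loop_eq (fuel : Nat) (v d : Int) (h1 : 1 ≤ v) (hf : v.toNat < fuel) :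
    nd_loop fuel v d = d - 1 + ((ntb_loop fuel v 25 []).length : Int) := by
  induction fuel generalizing v d with
  | zero => omega
  | succ fuel ih =>
    have hv0 : v ≠ 0 := by omega
    rw [nd_loop, ntb_loop, if_neg hv0]
    simp only [List.nil_append]
    by_cases hq : 25 ≤ v
    · rw [if_pos hq, ih _ _ (fd25_pos v hq) (by have := fd25_lt v h1; omega),
        ntb_loop_append fuel (PySem.Int.floordiv v 25) 25 [PySem.Int.mod v 25]]
      simp only [List.length_append, List.length_cons, List.length_nil]
      push_cast
      omega
    · rw [if_neg hq]
      have h0 : PySem.Int.floordiv v 25 = 0 := by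
        rw [fd25_eq_zero_iff v (by omega)]; omega
      rw [h0]
      have hz : ntb_loop fuel (0:Int) 25 [PySem.Int.mod v 25] = [PySem.Int.mod v 25] := by
        cases fuel <;> simp [ntb_loop]
      rw [hz]; simp

theorem num_digits_eq (v : Int) (h : 0 ≤ v) :
    num_digits_base25 v = ((number_to_base v 25).length : Int) := by
  by_cases hv : v = 0
  · subst hv; rfl
  · rw [num_digits_base25, nd_loop_eq _ _ _ (by omega) (by omega),
      number_to_base, if_neg hv]
    simp

-- digit-count bounds
theorem ntb_len_pow (fuel : Nat) (v : Int) (k : Nat) (h0 : 0 ≤ v) (hk : v < 25 ^ k) :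
    (ntb_loop fuel v 25 []).length ≤ k := by
  induction fuel generalizing v k with
  | zero => simp [ntb_loop]
  | succ fuel ih =>
    by_cases hv : v = 0
    · simp [ntb_loop, hv]
    · rw [ntb_loop, if_neg hv]
      simp only [List.nil_append]
      rw [ntb_loop_append fuel (PySem.Int.floordiv v 25) 25 [PySem.Int.mod v 25]]
      cases k with
      | zero => simp at hk; omega
      | succ j =>
        have hq0 : 0 ≤ PySem.Int.floordiv v 25 := fd25_nonneg v h0
        have hqk : PySem.Int.floordiv v 25 < 25 ^ j := by
          rw [(PySem.Int.floordiv_lt_iff_lt_mul (by norm_num) : _ < (25:Int) ^ j ↔ _)]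
          calc v < 25 ^ (j + 1) := hk
            _ = 25 ^ j * 25 := by ring
        have := ih (PySem.Int.floordiv v 25) j hq0 hqk
        simp only [List.length_append, List.length_cons, List.length_nil]
        omega

theorem ntb_len_ge1 (fuel : Nat) (v : Int) (hv : v ≠ 0) (hf : 1 ≤ fuel) :
    1 ≤ (ntb_loop fuel v 25 []).length := by
  cases fuel with
  | zero => omega
  | succ fuel =>
    rw [ntb_loop, if_neg hv, ntb_loop_append]
    simp

theorem ntb_len_ge2 (fuel : Nat) (v : Int) (hv : 25 ≤ v) (hf : 2 ≤ fuel) :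
    2 ≤ (ntb_loop fuel v 25 []).length := by
  cases fuel with
  | zero => omega
  | succ fuel =>
    rw [ntb_loop, if_neg (by omega : v ≠ 0)]
    simp only [List.nil_append]
    rw [ntb_loop_append fuel (PySem.Int.floordiv v 25) 25 [PySem.Int.mod v 25]]
    have h1 : (PySem.Int.floordiv v 25) ≠ 0 := by have := fd25_pos v hv; omega
    have := ntb_len_ge1 fuel _ h1 (by omega)
    simp only [List.length_append, List.length_cons, List.length_nil]
    omega

-- the prefix-sum table
def psum : List Char → Int → List Int
  | [], _ => []
  | c :: cs, a => (a + c.toNat) :: psum cs (a + c.toNat)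

theorem csp_fold (cs : List Char) (l : List Int) (a : Int) :
    (cs.foldl (fun (p : List Int × Int) ch =>
        (p.1 ++ [p.2 + (ch.toNat : Int)], p.2 + (ch.toNat : Int))) (l, a)).1
      = l ++ psum cs a := by
  induction cs generalizing l a with
  | nil => simp [psum]
  | cons c cs ih => simp [psum, ih]

theorem psum_getD (cs : List Char) (a : Int) (j : Nat) (hj : j < cs.length) :
    (psum cs a).getD j 0 = a + add_chars (cs.take (j + 1)) := by
  induction cs generalizing a j with
  | nil => simp at hj
  | cons c cs ih =>
    cases j with
    | zero => simp [psum, add_chars]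
    | succ j =>
      simp only [psum, List.getD_cons_succ, List.take_succ_cons, add_chars_cons]
      rw [ih _ j (by simpa using hj)]
      ring

theorem csp_getD (cs : List Char) (j : Nat) (hj : j ≤ cs.length) :
    (char_sum_prefixes cs).getD j 0 = add_chars (cs.take j) := by
  unfold char_sum_prefixes
  rw [csp_fold]
  cases j with
  | zero => simp [add_chars]
  | succ j =>
    simp only [List.cons_append, List.nil_append, List.getD_cons_succ]
    rw [psum_getD cs 0 j (by omega)]
    simp

-- slice bookkeeping (k ≥ 1 throughout the loop)
theorem clampIdx_neg (n : Nat) (k : Int) (hk : 1 ≤ k) :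
    PySem.List.clampIdx n (-k) = ((n : Int) - k).toNat := by
  unfold PySem.List.clampIdx
  split_ifs <;> omega

theorem slice_to_clamp {α : Type} (xs : List α) (b : Int) :
    PySem.List.slice xs none (some b) = xs.take (PySem.List.clampIdx xs.length b) := by
  simp [PySem.List.slice]

theorem slice_to_nil {α : Type} (xs : List α) (b : Int) (h1 : b ≤ 0)
    (h2 : b = 0 ∨ (xs.length : Int) ≤ -b) :
    PySem.List.slice xs none (some b) = [] := by
  rw [slice_to_clamp]
  have : PySem.List.clampIdx xs.length b = 0 := by
    unfold PySem.List.clampIdx; split_ifs <;> omega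
  rw [this]; rfl

theorem slice_from_sub (cs : List Char) (k : Int) (hk : 1 ≤ k)
    (hkn : k ≤ (cs.length : Int)) :
    PySem.List.slice cs (some ((cs.length : Int) - k)) none
      = PySem.List.slice cs (some (-k)) none := by
  rw [PySem.List.slice_some_none, PySem.List.slice_some_none, clampIdx_neg _ _ hk]
  congr 1
  unfold PySem.List.clampIdx
  split_ifs <;> omega

-- the A-side hash of one iteration, as B computes it
theorem hash_of_iter (cs : List Char) (k : Int) (hk : 1 ≤ k) :
    get_hash (PySem.List.slice cs none (some (-k))) ++ ['_']
      = hash_string ((char_sum_prefixes cs).getD ((cs.length : Int) - k).toNat 0) := by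
  rw [slice_to_clamp, clampIdx_neg _ _ hk,
    csp_getD cs _ (by omega), get_hash,
    hash_string_eq _ (add_chars_nonneg _)]

theorem hash_string_len (s : Int) (h : 0 ≤ s) :
    ((hash_string s).length : Int) = num_digits_base25 s + 1 := by
  rw [hash_string_eq s h, dts_eq_map, num_digits_eq s h]
  simp

-- one unfolding of A's loop equals one unfolding of B's (kept = k ≥ 1)
theorem loop_eq_aux (cs : List Char) (ml k : Int) (hk1 : 1 ≤ k)
    (hkn : k ≤ (cs.length : Int)) (f : Nat)
    (hrec : k = 1 ∨ (2 ≤ k ∧ shrink_loop cs ml (k - 1) f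
        = shrink_loop_alt cs (char_sum_prefixes cs) ml (PySem.List.pyRange (k - 1) 0 (-1)))) :
    shrink_loop cs ml k (f + 1)
      = shrink_loop_alt cs (char_sum_prefixes cs) ml (PySem.List.pyRange k 0 (-1)) := by
  rw [PySem.List.pyRange_neg_one_cons (by omega), shrink_loop, shrink_loop_alt]
  have hs0 : 0 ≤ (char_sum_prefixes cs).getD (((cs.length : Int)) - k).toNat 0 := by
    rw [csp_getD cs _ (by omega)]
    exact add_chars_nonneg _
  simp only [hash_of_iter cs k hk1, slice_from_sub cs k hk1 hkn, hash_string_len _ hs0]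
  set X := num_digits_base25
      ((char_sum_prefixes cs).getD (((cs.length : Int)) - k).toNat 0) with hX
  split_ifs with h1 h2 h3 h3
  · rfl
  · rfl
  · exact absurd (by omega : k = 1 ∨ X + 1 ≥ ml) h3
  · exact absurd (by omega : k - 1 = 0 ∨ X + 1 ≥ ml) h2
  · rcases hrec with h | ⟨h2k, hr⟩
    · exact absurd (Or.inl h) h3
    · exact hr

-- the two loops coincide for every kept ≥ 1 (enough fuel on A's side)
theorem loop_eq (cs : List Char) (ml : Int) : ∀ (kN fuel : Nat), kN + 1 ≤ fuel →
    ((kN : Int) + 1) ≤ (cs.length : Int) →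
    shrink_loop cs ml ((kN : Int) + 1) fuel
      = shrink_loop_alt cs (char_sum_prefixes cs) ml
          (PySem.List.pyRange ((kN : Int) + 1) 0 (-1)) := by
  intro kN
  induction kN with
  | zero =>
    intro fuel hf hn
    obtain ⟨f, rfl⟩ : ∃ f, fuel = f + 1 := ⟨fuel - 1, by omega⟩
    exact loop_eq_aux cs ml _ (by omega) (by push_cast; omega) f (Or.inl (by norm_num))
  | succ kN ih =>
    intro fuel hf hn
    obtain ⟨f, rfl⟩ : ∃ f, fuel = f + 1 := ⟨fuel - 1, by omega⟩
    refine loop_eq_aux cs ml _ (by push_cast; omega) (by push_cast at hn ⊢; omega) f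
      (Or.inr ⟨by push_cast; omega, ?_⟩)
    have hkk : ((kN : Int) + 1 : Int) + 1 - 1 = (kN : Int) + 1 := by ring
    have hc : (((kN + 1 : Nat) : Int) + 1) - 1 = (kN : Int) + 1 := by push_cast; ring
    rw [hc]
    exact ih f (by omega) (by push_cast at hn ⊢; omega)

-- B's empty-range fallback: the truncated hash of the whole name
theorem alt_nil (cs : List Char) (ml : Int) (h : ml - 2 ≤ 0) :
    shrink_loop_alt cs (char_sum_prefixes cs) ml (PySem.List.pyRange (ml - 2) 0 (-1))
      = some (String.ofList (PySem.List.slice (hash_string (add_chars cs)) none (some ml))) := by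
  rw [PySem.List.pyRange_neg_one_eq_nil (by omega), shrink_loop_alt,
    csp_getD cs cs.length le_rfl]
  simp

-- ===== VERDICT (by name: the statement is the Claim_ definition above) =====
theorem shrink_name_spec : Claim_unchanged_shrink_name := by
  intro name ml _ hnd
  unfold shrink_name shrink_name_alt
  simp only []
  split_ifs with h1 h2
  · rfl
  · rfl
  · set cs := name.toList with hcs
    unfold D_shrink_name at hnd
    push Not at hnd
    by_cases hml : 3 ≤ ml
    · obtain ⟨kN, hkN⟩ : ∃ kN : Nat, (kN : Int) + 1 = ml - 2 := ⟨(ml - 3).toNat, by omega⟩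
      rw [← hkN]
      have hfe : (((kN : Int) + 1).toNat + 1) = kN + 1 + 1 := by omega
      rw [hfe]
      exact loop_eq cs ml kN _ (by omega) (by omega)
    · -- ml ≤ 2; outside D_ this forces ml ≤ 0 and both truncated hashes empty
      have hn : ml < (cs.length : Int) := by omega
      obtain ⟨hml2, hml1, himp⟩ := hnd h1 hn
      have hml0 : ml ≤ 0 := by omega
      obtain ⟨hs1, hsT⟩ := himp hml0
      have hs1' : 25 ≤ add_chars (cs.take (2 - ml).toNat) := hs1
      set s1 := add_chars (cs.take (2 - ml).toNat) with hs1def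
      set sT := add_chars cs with hsTdef
      have hsle : s1 ≤ sT := add_chars_take_le cs _
      -- B falls straight through its empty range
      rw [alt_nil cs ml (by omega)]
      -- A runs exactly one iteration
      have hfe : (ml - 2).toNat + 1 = 1 := by omega
      rw [hfe, shrink_loop]
      have hsec : PySem.List.slice cs none (some (-(ml - 2))) = cs.take (2 - ml).toNat := by
        rw [slice_to_clamp]
        have hci : PySem.List.clampIdx cs.length (-(ml - 2)) = min (2 - ml).toNat cs.length := by
          unfold PySem.List.clampIdx
          split_ifs <;> omega
        rw [hci]
        rcases le_total ((2 - ml).toNat) cs.length with h | h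
        · rw [min_eq_left h]
        · rw [min_eq_right h, List.take_of_length_le h, List.take_of_length_le (le_refl _)]
      have hlenA : ((get_hash (PySem.List.slice cs none (some (-(ml - 2)))) ++ ['_']).length : Int)
          = ((ntb_loop (s1.toNat + 1) s1 25 []).length : Int) + 1 := by
        rw [hsec, get_hash, dts_eq_map, ← hs1def, number_to_base, if_neg (by omega)]
        simp
      have hge : 3 ≤ ((get_hash (PySem.List.slice cs none (some (-(ml - 2)))) ++ ['_']).length : Int) := by
        have := ntb_len_ge2 (s1.toNat + 1) s1 hs1' (by omega)
        omega
      rw [if_neg (by omega), if_pos (Or.inr (by omega))]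
      -- both remaining truncations are empty
      have hA : PySem.List.slice (get_hash (PySem.List.slice cs none (some (-(ml - 2)))) ++ ['_'])
          none (some ml) = [] := by
        refine slice_to_nil _ ml (by omega) ?_
        by_cases h0 : ml = 0
        · exact Or.inl h0
        · right
          have hpow : sT < 25 ^ (-ml - 1).toNat := hsT (by omega)
          have hb := ntb_len_pow (s1.toNat + 1) s1 ((-ml - 1).toNat)
            (by have := add_chars_nonneg (cs.take (2 - ml).toNat); omega) (by omega)
          have hcast : (((-ml - 1).toNat : Int)) = -ml - 1 := by omega
          omega
      have hB : PySem.List.slice (hash_string sT) none (some ml) = [] := by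
        refine slice_to_nil _ ml (by omega) ?_
        by_cases h0 : ml = 0
        · exact Or.inl h0
        · right
          have hpow : sT < 25 ^ (-ml - 1).toNat := hsT (by omega)
          have hnn : 0 ≤ sT := add_chars_nonneg cs
          have hlenB : ((hash_string sT).length : Int)
              = ((ntb_loop (sT.toNat + 1) sT 25 []).length : Int) + 1 := by
            rw [hash_string_eq sT hnn, dts_eq_map, number_to_base, if_neg (by omega)]
            simp
          have hb := ntb_len_pow (sT.toNat + 1) sT ((-ml - 1).toNat) hnn (by omega)
          have hcast : (((-ml - 1).toNat : Int)) = -ml - 1 := by omega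
          omega
      rw [hA, hB]

theorem shrink_name_changed : Claim_changed_shrink_name := by
  unfold Claim_changed_shrink_name; decide
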